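-- pv_equiv track=rewrite | github.com/jujoesgo3/time-series-to-complex-networks- | src/network_construction/entropia_grafo.py | crear_ind
-- ===== SOURCE A (Python) =====
-- def crear_ind(x, tamaño_w):
--     x_redo1 = x
--     x_w1 = []
--
--     for i in range(len(x_redo1)):
--         sub = x_redo1[i:i+tamaño_w]
--         x_w1.append(sub)
--
--     ind_x1 = []
--     for i in range(len(x_w1)-tamaño_w):
--         ind = [index for index, value in sorted(enumerate(x_w1[i]), key=lambda x: x[1])]
--         posiciones = sorted(range(len(ind)), key=lambda k: ind[k])
--         ind_x1.append(posiciones)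
--
--     return ind_x1
-- ===== SOURCE B (Python) =====
-- def crear_ind(x, tamaño_w):
--     ind_x1 = []
--     for i in range(len(x) - tamaño_w):
--         win = x[i:i+tamaño_w]
--         posiciones = [
--             sum(1 for j in range(len(win))
--                 if win[j] < win[k] or (win[j] == win[k] and j < k))
--             for k in range(len(win))
--         ]
--         ind_x1.append(posiciones)
--     return ind_x1
-- ===== Notes on version B (the rewrite author's own statement) =====
-- stated objective: alternative
-- what changed: Replaces the double stable-argsort (sort enumerated window by value, then sort indices by that argsort) with a direct rank computation: each position's rank is counted as the number of window entries that are smaller, or equal with a smaller index, reproducing stable tie-breaking without any sorting.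
import Mathlib
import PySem

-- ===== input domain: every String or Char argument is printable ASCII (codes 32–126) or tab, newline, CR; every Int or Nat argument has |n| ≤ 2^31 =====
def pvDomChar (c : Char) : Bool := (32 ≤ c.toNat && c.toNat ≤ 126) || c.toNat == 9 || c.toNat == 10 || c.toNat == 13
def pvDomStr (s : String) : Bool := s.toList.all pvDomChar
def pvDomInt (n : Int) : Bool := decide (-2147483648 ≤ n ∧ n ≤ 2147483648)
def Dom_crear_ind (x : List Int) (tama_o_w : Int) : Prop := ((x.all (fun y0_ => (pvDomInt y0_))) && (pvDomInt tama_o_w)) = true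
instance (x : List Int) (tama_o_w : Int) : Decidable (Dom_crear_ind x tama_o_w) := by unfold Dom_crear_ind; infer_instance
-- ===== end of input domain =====

-- B replaces the two stable sorts per window by a direct nested-count of each position's rank (alternative decomposition, no sorting).

-- ===== PORT A =====
def crear_ind (x : List Int) (tama_o_w : Int) : List (List Int) :=
  let x_w1 : List (List Int) :=
    (PySem.List.pyRange 0 (x.length : Int) 1).foldl
      (fun acc i => acc ++ [PySem.List.slice x (some i) (some (i + tama_o_w))]) []
  (PySem.List.pyRange 0 ((x_w1.length : Int) - tama_o_w) 1).foldl
    (fun acc i =>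
      -- x_w1[i]: exact under Pre_ (0 ≤ tama_o_w keeps i in range, so no IndexError)
      let win := PySem.List.pyGetD x_w1 i []
      let ind := (PySem.List.sorted (PySem.List.enumerate win 0) (fun p => p.2) false).map (fun p => p.1)
      -- ind[k]: k ranges over range(len(ind)), always in range, so pyGetD is exact
      let posiciones := PySem.List.sorted (PySem.List.pyRange 0 ((ind.length : Int)) 1)
        (fun k => PySem.List.pyGetD ind k 0) false
      acc ++ [posiciones]) []

-- ===== PORT B =====
def crear_ind_alt (x : List Int) (tama_o_w : Int) : List (List Int) :=
  (PySem.List.pyRange 0 ((x.length : Int) - tama_o_w) 1).foldl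
    (fun acc i =>
      let win := PySem.List.slice x (some i) (some (i + tama_o_w))
      let posiciones := (PySem.List.pyRange 0 ((win.length : Int)) 1).map (fun k =>
        ((PySem.List.pyRange 0 ((win.length : Int)) 1).map (fun j =>
          if PySem.List.pyGetD win j 0 < PySem.List.pyGetD win k 0 ∨
             (PySem.List.pyGetD win j 0 = PySem.List.pyGetD win k 0 ∧ j < k) then (1 : Int) else 0)).sum)
      acc ++ [posiciones]) []

-- ===== PRECONDITION & SPEC =====
-- Pre_ excludes negative tama_o_w, on which A raises IndexError (it indexes x_w1 past its end).
def Pre_crear_ind (x : List Int) (tama_o_w : Int) : Prop := 0 ≤ tama_o_w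
instance (x : List Int) (tama_o_w : Int) : Decidable (Pre_crear_ind x tama_o_w) := by unfold Pre_crear_ind; infer_instance
def pvWitness_crear_ind : List Int × Int := ([1, 3, 2, 2, 5], 3)
def Spec_crear_ind (x : List Int) (tama_o_w : Int) (out : List (List Int)) : Prop := out = crear_ind_alt x tama_o_w
instance (x : List Int) (tama_o_w : Int) (out : List (List Int)) : Decidable (Spec_crear_ind x tama_o_w out) := by unfold Spec_crear_ind; infer_instance

-- ===== CLAIM (what is proved, stated in full; the proofs are below) =====
def Claim_equal_crear_ind : Prop := ∀ (x : List Int) (tama_o_w : Int), Dom_crear_ind x tama_o_w → Pre_crear_ind x tama_o_w → Spec_crear_ind x tama_o_w (crear_ind x tama_o_w)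

-- ===== LEMMAS AND PROOFS =====

def pvQb (p q : Int × Int) : Bool := p.2 < q.2 || (p.2 == q.2 && p.1 < q.1)

theorem pvQb_asymm {p q : Int × Int} (h : pvQb p q = true) : pvQb q p = false := by
  simp [pvQb] at *; omega

theorem pvQb_irrefl (p : Int × Int) : pvQb p p = false := by simp [pvQb]

theorem insertBy_pairwise (x : Int × Int) (acc : List (Int × Int))
    (hacc : acc.Pairwise (fun a b => pvQb a b = true))
    (hx : ∀ y ∈ acc, y.2 = x.2 → y.1 < x.1) :
    (PySem.List.insertBy (fun a b => decide (a.2 < b.2)) x acc).Pairwise (fun a b => pvQb a b = true) := by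
  induction acc with
  | nil => simp [PySem.List.insertBy]
  | cons y t ih =>
    rw [PySem.List.insertBy]
    by_cases hxy : x.2 < y.2
    · simp only [hxy, decide_true, if_true]
      refine List.pairwise_cons.mpr ⟨?_, hacc⟩
      intro z hz
      rcases List.mem_cons.mp hz with rfl | hz
      · simp [pvQb]; omega
      · have := (List.pairwise_cons.mp hacc).1 z hz
        simp [pvQb] at this ⊢; omega
    · simp only [hxy, decide_false]
      simp only [if_false, Bool.false_eq_true]
      refine List.pairwise_cons.mpr ⟨?_, ?_⟩
      · intro z hz
        rcases (PySem.List.mem_insertBy _ _ _ _).mp hz with rfl | hz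
        · by_cases he : y.2 = z.2
          · have := hx y (List.mem_cons_self) he
            simp [pvQb]; omega
          · simp [pvQb]; omega
        · exact (List.pairwise_cons.mp hacc).1 z hz
      · exact ih (List.pairwise_cons.mp hacc).2 (fun z hz => hx z (List.mem_cons_of_mem _ hz))

theorem sorted_stable_aux (xs acc : List (Int × Int))
    (hxs : xs.Pairwise (fun p q => p.1 < q.1))
    (hacc : acc.Pairwise (fun a b => pvQb a b = true))
    (hcross : ∀ y ∈ acc, ∀ b ∈ xs, y.1 < b.1) :
    (xs.foldl (fun acc x => PySem.List.insertBy (fun a b => decide (a.2 < b.2)) x acc) acc).Pairwise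
      (fun a b => pvQb a b = true) := by
  induction xs generalizing acc with
  | nil => simpa using hacc
  | cons x xs ih =>
    simp only [List.foldl_cons]
    refine ih _ (List.pairwise_cons.mp hxs).2
      (insertBy_pairwise x acc hacc (fun y hy _ => hcross y hy x List.mem_cons_self)) ?_
    intro y hy b hb
    rcases (PySem.List.mem_insertBy _ _ _ _).mp hy with rfl | hy
    · exact (List.pairwise_cons.mp hxs).1 b hb
    · exact hcross y hy b (List.mem_cons_of_mem _ hb)

theorem sorted_stable (xs : List (Int × Int))
    (hxs : xs.Pairwise (fun p q => p.1 < q.1)) :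
    (PySem.List.sorted xs (fun p => p.2) false).Pairwise (fun a b => pvQb a b = true) := by
  rw [PySem.List.sorted_eq_foldl_insertBy]
  exact sorted_stable_aux xs [] hxs (by simp) (by simp)

theorem pos_count (S : List (Int × Int)) (hS : S.Pairwise (fun a b => pvQb a b = true))
    (k : Nat) (hk : k < S.length) :
    S.countP (fun y => pvQb y S[k]) = k := by
  induction S generalizing k with
  | nil => simp at hk
  | cons p t ih =>
    match k with
    | 0 =>
      simp only [List.getElem_cons_zero, List.countP_cons, pvQb_irrefl p]
      have : t.countP (fun y => pvQb y p) = 0 := by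
        rw [List.countP_eq_zero]
        intro z hz
        simp [pvQb_asymm ((List.pairwise_cons.mp hS).1 z hz)]
      simp [this]
    | k + 1 =>
      have hk' : k < t.length := by simpa using hk
      simp only [List.getElem_cons_succ, List.countP_cons]
      have hpz : pvQb p t[k] = true :=
        (List.pairwise_cons.mp hS).1 _ (List.getElem_mem hk')
      rw [ih (List.pairwise_cons.mp hS).2 k hk', hpz]
      simp

def pvS (win : List Int) : List (Int × Int) :=
  PySem.List.sorted (PySem.List.enumerate win 0) (fun p => p.2) false

def pvRank (win : List Int) (r : Int) : Nat :=
  (PySem.List.enumerate win 0).countP (fun p => pvQb p (r, PySem.List.pyGetD win r 0))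

theorem rank_getElem (win : List Int) (r : Int) (h0 : 0 ≤ r) (h1 : r < (win.length : Int)) :
    ∃ hk : pvRank win r < (pvS win).length,
      (pvS win)[pvRank win r] = (r, PySem.List.pyGetD win r 0) := by
  have hperm : (pvS win).Perm (PySem.List.enumerate win 0) :=
    PySem.List.sorted_perm _ _ _
  have hget : PySem.List.pyGetD win r 0 = win[r.toNat]'(by omega) :=
    PySem.List.pyGetD_eq_getElem win 0 h0 h1
  have hmem : (r, PySem.List.pyGetD win r 0) ∈ PySem.List.enumerate win 0 := by
    rw [PySem.List.mem_enumerate_iff]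
    exact ⟨r.toNat, by omega, by rw [hget]; simp; omega⟩
  have hmemS : (r, PySem.List.pyGetD win r 0) ∈ pvS win := hperm.mem_iff.mpr hmem
  obtain ⟨k, hk, hSk⟩ := List.mem_iff_getElem.mp hmemS
  have hcnt := pos_count (pvS win) (sorted_stable _ (PySem.List.pairwise_lt_enumerate win 0)) k hk
  rw [hSk] at hcnt
  have : pvRank win r = k := by
    rw [pvRank, ← hcnt, hperm.countP_eq]
  rw [this]
  exact ⟨hk, hSk⟩

def pvInd (win : List Int) : List Int := (pvS win).map (fun p => p.1)

theorem len_S (win : List Int) : (pvS win).length = win.length := by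
  simp [pvS, PySem.List.length_sorted, PySem.List.length_enumerate]

theorem rank_lt (win : List Int) (r : Int) (h0 : 0 ≤ r) (h1 : r < (win.length : Int)) :
    pvRank win r < win.length := by
  obtain ⟨hk, -⟩ := rank_getElem win r h0 h1
  rwa [len_S] at hk

theorem ind_rank (win : List Int) (r : Int) (h0 : 0 ≤ r) (h1 : r < (win.length : Int)) :
    PySem.List.pyGetD (pvInd win) ((pvRank win r : Nat) : Int) 0 = r := by
  obtain ⟨hk, hSk⟩ := rank_getElem win r h0 h1
  rw [PySem.List.pyGetD_natCast]
  rw [pvInd, List.getD_eq_getElem _ _ (by simpa using hk)]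
  simp [hSk]

theorem rank_inj (win : List Int) (a b : Int) (ha0 : 0 ≤ a) (ha1 : a < (win.length : Int))
    (hb0 : 0 ≤ b) (hb1 : b < (win.length : Int)) (h : pvRank win a = pvRank win b) : a = b := by
  have := ind_rank win a ha0 ha1
  rw [h, ind_rank win b hb0 hb1] at this
  omega

theorem bsum_eq_rank (win : List Int) (k : Int) :
    ((PySem.List.pyRange 0 ((win.length : Int)) 1).map (fun j =>
      if PySem.List.pyGetD win j 0 < PySem.List.pyGetD win k 0 ∨
         (PySem.List.pyGetD win j 0 = PySem.List.pyGetD win k 0 ∧ j < k) then (1 : Int) else 0)).sum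
    = (pvRank win k : Int) := by
  have h1' : (List.map (fun j =>
      if PySem.List.pyGetD win j 0 < PySem.List.pyGetD win k 0 ∨
         (PySem.List.pyGetD win j 0 = PySem.List.pyGetD win k 0 ∧ j < k) then (1 : Int) else 0)
      (PySem.List.pyRange 0 ((win.length : Int)) 1))
      = (List.map (fun j => if (fun j => pvQb (j, PySem.List.pyGetD win j 0) (k, PySem.List.pyGetD win k 0)) j = true then (1 : Int) else 0)
      (PySem.List.pyRange 0 ((win.length : Int)) 1)) := by
    refine List.map_congr_left ?_
    intro j _
    simp [pvQb]
  rw [h1', PySem.List.sum_map_ite_one_zero]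
  rw [pvRank]
  rw [PySem.List.enumerate_eq_map_pyRange win 0, List.countP_map]
  norm_num
  rfl

theorem window_eq (win : List Int) :
    PySem.List.sorted (PySem.List.pyRange 0 (((pvInd win).length : Int)) 1)
      (fun k => PySem.List.pyGetD (pvInd win) k 0) false
    = (PySem.List.pyRange 0 ((win.length : Int)) 1).map (fun k =>
        ((PySem.List.pyRange 0 ((win.length : Int)) 1).map (fun j =>
          if PySem.List.pyGetD win j 0 < PySem.List.pyGetD win k 0 ∨
             (PySem.List.pyGetD win j 0 = PySem.List.pyGetD win k 0 ∧ j < k) then (1 : Int) else 0)).sum) := by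
  have hlen : (pvInd win).length = win.length := by simp [pvInd, len_S]
  rw [hlen]
  have hB : (PySem.List.pyRange 0 ((win.length : Int)) 1).map (fun k =>
        ((PySem.List.pyRange 0 ((win.length : Int)) 1).map (fun j =>
          if PySem.List.pyGetD win j 0 < PySem.List.pyGetD win k 0 ∨
             (PySem.List.pyGetD win j 0 = PySem.List.pyGetD win k 0 ∧ j < k) then (1 : Int) else 0)).sum)
      = (PySem.List.pyRange 0 ((win.length : Int)) 1).map (fun k => ((pvRank win k : Nat) : Int)) :=
    List.map_congr_left (fun k _ => bsum_eq_rank win k)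
  rw [hB]
  have hperm : ((PySem.List.pyRange 0 ((win.length : Int)) 1).map (fun k => ((pvRank win k : Nat) : Int))).Perm
      (PySem.List.pyRange 0 ((win.length : Int)) 1) := by
    have hsub : ((PySem.List.pyRange 0 ((win.length : Int)) 1).map (fun k => ((pvRank win k : Nat) : Int)))
        ⊆ PySem.List.pyRange 0 ((win.length : Int)) 1 := by
      intro z hz
      obtain ⟨k, hk, rfl⟩ := List.mem_map.mp hz
      obtain ⟨hk0, hk1⟩ := PySem.List.mem_pyRange_one.mp hk
      have := rank_lt win k hk0 hk1
      exact PySem.List.mem_pyRange_one.mpr ⟨by positivity, by exact_mod_cast this⟩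
    have hnodup : ((PySem.List.pyRange 0 ((win.length : Int)) 1).map (fun k => ((pvRank win k : Nat) : Int))).Nodup := by
      refine List.Nodup.map_on ?_ (PySem.List.nodup_pyRange_one 0 _)
      intro a ha b hb hab
      obtain ⟨ha0, ha1⟩ := PySem.List.mem_pyRange_one.mp ha
      obtain ⟨hb0, hb1⟩ := PySem.List.mem_pyRange_one.mp hb
      exact rank_inj win a b ha0 ha1 hb0 hb1 (by exact_mod_cast hab)
    have hlen2 : (PySem.List.pyRange 0 ((win.length : Int)) 1).length
        ≤ ((PySem.List.pyRange 0 ((win.length : Int)) 1).map (fun k => ((pvRank win k : Nat) : Int))).length := by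
      simp
    exact (List.subperm_of_subset hnodup hsub).perm_of_length_le hlen2
  refine PySem.List.sorted_eq_of_perm_of_pairwise_lt _ _ _ hperm ?_
  rw [List.pairwise_map]
  refine (PySem.List.pairwise_lt_pyRange_one 0 ((win.length : Int))).imp_of_mem ?_
  intro a b ha hb hab
  obtain ⟨ha0, ha1⟩ := PySem.List.mem_pyRange_one.mp ha
  obtain ⟨hb0, hb1⟩ := PySem.List.mem_pyRange_one.mp hb
  rw [ind_rank win a ha0 ha1, ind_rank win b hb0 hb1]
  exact hab

theorem window_eq' (win : List Int) :
    PySem.List.sorted (PySem.List.pyRange 0 ((((PySem.List.sorted (PySem.List.enumerate win 0) (fun p => p.2) false).map (fun p => p.1)).length : Int)) 1)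
      (fun k => PySem.List.pyGetD ((PySem.List.sorted (PySem.List.enumerate win 0) (fun p => p.2) false).map (fun p => p.1)) k 0) false
    = (PySem.List.pyRange 0 ((win.length : Int)) 1).map (fun k =>
        ((PySem.List.pyRange 0 ((win.length : Int)) 1).map (fun j =>
          if PySem.List.pyGetD win j 0 < PySem.List.pyGetD win k 0 ∨
             (PySem.List.pyGetD win j 0 = PySem.List.pyGetD win k 0 ∧ j < k) then (1 : Int) else 0)).sum) := by
  have h := window_eq win
  simpa [pvInd, pvS] using h

-- ===== VERDICT (by name: the statement is the Claim_ definition above) =====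
theorem crear_ind_spec : Claim_equal_crear_ind := by
  intro x w _ hpre
  unfold Pre_crear_ind at hpre
  unfold Spec_crear_ind
  simp only [crear_ind, crear_ind_alt, PySem.List.foldl_append_singleton_eq_map, List.nil_append]
  have hxw : (List.map (fun i => PySem.List.slice x (some i) (some (i + w))) (PySem.List.pyRange 0 ((x.length : Int)) 1)).length = x.length := by
    simp [PySem.List.length_pyRange_one]
  simp only [hxw]
  refine List.map_congr_left ?_
  intro i hi
  obtain ⟨hi0, hi1⟩ := PySem.List.mem_pyRange_one.mp hi
  rw [PySem.List.pyGetD_map_pyRange_of_nonneg (fun i => PySem.List.slice x (some i) (some (i + w))) ((x.length : Int)) i [] hi0 (by omega)]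
  exact window_eq' (PySem.List.slice x (some i) (some (i + w)))
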